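-- pv_equiv track=rewrite | github.com/adamchaz/clo-system-ai | backend/app/models/waterfall.py | _get_payment_priority
-- ===== SOURCE A (Python) =====
-- from enum import Enum
--
-- class WaterfallStep(str, Enum):
--     """Waterfall payment steps in priority order"""
--     # Collection Account Management
--     COLLECTION = "COLLECTION"
--     EXPENSES = "EXPENSES"
--
--     # Senior Fees and Expenses
--     TRUSTEE_FEES = "TRUSTEE_FEES"
--     ADMIN_FEES = "ADMIN_FEES"
--     SENIOR_MGMT_FEES = "SENIOR_MGMT_FEES"
--
--     # Interest Payments (by seniority)
--     CLASS_A_INTEREST = "CLASS_A_INTEREST"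
--     CLASS_B_INTEREST = "CLASS_B_INTEREST"
--     CLASS_C_INTEREST = "CLASS_C_INTEREST"
--     CLASS_D_INTEREST = "CLASS_D_INTEREST"
--
--     # Reserve Account Funding
--     INTEREST_RESERVE = "INTEREST_RESERVE"
--
--     # Principal Payments
--     CLASS_A_PRINCIPAL = "CLASS_A_PRINCIPAL"
--     CLASS_B_PRINCIPAL = "CLASS_B_PRINCIPAL"
--     CLASS_C_PRINCIPAL = "CLASS_C_PRINCIPAL"
--     CLASS_D_PRINCIPAL = "CLASS_D_PRINCIPAL"
--
--     # Junior Management Fees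
--     JUNIOR_MGMT_FEES = "JUNIOR_MGMT_FEES"
--     INCENTIVE_MGMT_FEES = "INCENTIVE_MGMT_FEES"
--
--     # Subordinated Payments
--     CLASS_E_INTEREST = "CLASS_E_INTEREST"
--     CLASS_E_PRINCIPAL = "CLASS_E_PRINCIPAL"
--
--     # Residual
--     RESIDUAL_EQUITY = "RESIDUAL_EQUITY"
--
-- class PaymentPriority(str, Enum):
--     """Payment priority levels"""
--     SENIOR = "SENIOR"
--     SUBORDINATED = "SUBORDINATED"
--     RESIDUAL = "RESIDUAL"
--
-- def _get_payment_priority(step: str) -> str: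
--     """Get payment priority level for waterfall step"""
--     senior_steps = [
--         WaterfallStep.TRUSTEE_FEES, WaterfallStep.ADMIN_FEES,
--         WaterfallStep.SENIOR_MGMT_FEES, WaterfallStep.CLASS_A_INTEREST,
--         WaterfallStep.CLASS_B_INTEREST, WaterfallStep.CLASS_C_INTEREST,
--         WaterfallStep.CLASS_D_INTEREST, WaterfallStep.INTEREST_RESERVE,
--         WaterfallStep.CLASS_A_PRINCIPAL, WaterfallStep.CLASS_B_PRINCIPAL,
--         WaterfallStep.CLASS_C_PRINCIPAL, WaterfallStep.CLASS_D_PRINCIPAL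
--     ]
--
--     if step in [s.value for s in senior_steps]:
--         return PaymentPriority.SENIOR.value
--     elif step in [WaterfallStep.CLASS_E_INTEREST.value, WaterfallStep.CLASS_E_PRINCIPAL.value]:
--         return PaymentPriority.SUBORDINATED.value
--     else:
--         return PaymentPriority.RESIDUAL.value
-- ===== SOURCE B (Python) =====
-- def _get_payment_priority(step: str) -> str:
--     """Get payment priority level for waterfall step.
--
--     Classifies by parsing the step name instead of scanning membership lists:
--     note cash-flow steps look like CLASS_<tranche>_INTEREST / CLASS_<tranche>_PRINCIPAL,
--     tranches A-D are senior, tranche E is subordinated; among fee steps exactly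
--     TRUSTEE/ADMIN/SENIOR_MGMT fees are senior, as is the interest reserve funding;
--     everything else is residual.
--     """
--     if step[:6] == "CLASS_" and step[7:] in ("_INTEREST", "_PRINCIPAL"):
--         tranche = step[6]  # in range: step[7:] is non-empty here
--         if "A" <= tranche <= "D":
--             return "SENIOR"
--         if tranche == "E":
--             return "SUBORDINATED"
--         return "RESIDUAL"
--     if step.endswith("_FEES"):
--         return "SENIOR" if step[:-5] in ("TRUSTEE", "ADMIN", "SENIOR_MGMT") else "RESIDUAL"
--     return "SENIOR" if step == "INTEREST_RESERVE" else "RESIDUAL"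
-- ===== Notes on version B (the rewrite author's own statement) =====
-- stated objective: alternative
-- what changed: Replaces A's per-call membership lists and three-way branch by parsing the step name: a CLASS_<tranche>_INTEREST/_PRINCIPAL pattern match with a tranche-letter range test (A-D senior, E subordinated), an _FEES suffix check for the three senior fee steps, and the reserve step, defaulting to RESIDUAL.
import Mathlib
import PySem

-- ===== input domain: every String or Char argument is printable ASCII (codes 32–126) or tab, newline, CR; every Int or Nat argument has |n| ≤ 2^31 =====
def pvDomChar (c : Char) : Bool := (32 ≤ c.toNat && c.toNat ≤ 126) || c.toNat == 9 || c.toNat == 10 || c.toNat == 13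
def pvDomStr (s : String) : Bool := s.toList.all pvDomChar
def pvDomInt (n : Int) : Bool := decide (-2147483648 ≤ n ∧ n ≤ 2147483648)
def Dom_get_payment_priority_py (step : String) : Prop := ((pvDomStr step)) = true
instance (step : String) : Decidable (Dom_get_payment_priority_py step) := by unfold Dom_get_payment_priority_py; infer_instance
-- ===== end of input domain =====

-- B classifies a step by PARSING its name (CLASS_<tranche>_INTEREST/_PRINCIPAL with a
-- tranche-letter range test, an "_FEES" suffix check) instead of A's per-call membership
-- lists and three-way branch (alternative decomposition; same cost).

-- ===== PORT A =====
def get_payment_priority_py (step : String) : String :=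
  let senior_steps : List String :=
    ["TRUSTEE_FEES", "ADMIN_FEES",
     "SENIOR_MGMT_FEES", "CLASS_A_INTEREST",
     "CLASS_B_INTEREST", "CLASS_C_INTEREST",
     "CLASS_D_INTEREST", "INTEREST_RESERVE",
     "CLASS_A_PRINCIPAL", "CLASS_B_PRINCIPAL",
     "CLASS_C_PRINCIPAL", "CLASS_D_PRINCIPAL"]
  if step ∈ senior_steps then "SENIOR"
  else if step ∈ ["CLASS_E_INTEREST", "CLASS_E_PRINCIPAL"] then "SUBORDINATED"
  else "RESIDUAL"

-- ===== PORT B =====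
-- Python's step[6] is a 1-char string; it is ported as the Char PySem.Str.pyGet? returns,
-- and the 1-char string comparisons "A" <= tranche <= "D" / == "E" as the same Char
-- comparisons (exact: Python compares strings by code points). The `none` arm of the
-- match is Python's IndexError arm; it is unreachable because step[7:] is non-empty.
def get_payment_priority_py_alt (step : String) : String :=
  if PySem.Str.slice step none (some 6) = "CLASS_" ∧
     (PySem.Str.slice step (some 7) none = "_INTEREST" ∨
      PySem.Str.slice step (some 7) none = "_PRINCIPAL") then
    match PySem.Str.pyGet? step 6 with
    | some tranche =>
        if 'A' ≤ tranche ∧ tranche ≤ 'D' then "SENIOR"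
        else if tranche = 'E' then "SUBORDINATED"
        else "RESIDUAL"
    | none => "RESIDUAL"
  else if PySem.Str.endswith step "_FEES" then
    if PySem.Str.slice step none (some (-5)) ∈ (["TRUSTEE", "ADMIN", "SENIOR_MGMT"] : List String)
    then "SENIOR" else "RESIDUAL"
  else if step = "INTEREST_RESERVE" then "SENIOR" else "RESIDUAL"

-- ===== PRECONDITION & SPEC =====
def Spec_get_payment_priority_py (step : String) (out : String) : Prop := out = get_payment_priority_py_alt step
instance (step : String) (out : String) : Decidable (Spec_get_payment_priority_py step out) := by unfold Spec_get_payment_priority_py; infer_instance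

-- ===== CLAIM (what is proved, stated in full; the proofs are below) =====
def Claim_equal_get_payment_priority_py : Prop := ∀ (step : String), Dom_get_payment_priority_py step → Spec_get_payment_priority_py step (get_payment_priority_py step)

-- ===== LEMMAS AND PROOFS =====

-- A tranche letter lies in A..D exactly when it is one of the four letters.
theorem tranche_range_iff (c : Char) :
    ('A' ≤ c ∧ c ≤ 'D') ↔ (c = 'A' ∨ c = 'B' ∨ c = 'C' ∨ c = 'D') := by
  constructor
  · rintro ⟨h1, h2⟩
    have n1 : 65 ≤ c.toNat := h1
    have n2 : c.toNat ≤ 68 := h2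
    have hc : c.toNat = 65 ∨ c.toNat = 66 ∨ c.toNat = 67 ∨ c.toNat = 68 := by omega
    have eqc : ∀ n : Nat, c.toNat = n → c = Char.ofNat n := by
      intro n h; rw [← h, Char.ofNat_toNat]
    rcases hc with h|h|h|h
    · exact Or.inl (eqc _ h)
    · exact Or.inr (Or.inl (eqc _ h))
    · exact Or.inr (Or.inr (Or.inl (eqc _ h)))
    · exact Or.inr (Or.inr (Or.inr (eqc _ h)))
  · rintro (rfl|rfl|rfl|rfl) <;> exact ⟨by decide, by decide⟩

-- If step passes B's CLASS-pattern test, its character list is CLASS_ ++ [step[6]] ++ rest.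
theorem class_shape (step : String) (rest : List Char) (hr : 9 ≤ rest.length)
    (h6 : (PySem.Str.slice step none (some 6)).toList = "CLASS_".toList)
    (h7 : (PySem.Str.slice step (some 7) none).toList = rest) :
    ∃ c, step.toList[(6:Nat)]? = some c ∧
      step.toList = "CLASS_".toList ++ c :: rest := by
  simp only [PySem.Str.toList_slice, PySem.Chars.slice_eq_listSlice] at h6 h7
  rw [show ((6:Int) = ((6:Nat):Int)) from rfl] at h6
  rw [show ((7:Int) = ((7:Nat):Int)) from rfl] at h7
  rw [PySem.List.slice_to_natCast] at h6
  rw [PySem.List.slice_from_natCast] at h7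
  have l7 : step.toList.length - 7 = rest.length := by
    rw [← h7, List.length_drop]
  have h6lt : 6 < step.toList.length := by omega
  have hd : step.toList.drop 6 = step.toList[6] :: step.toList.drop 7 :=
    List.drop_eq_getElem_cons h6lt
  refine ⟨step.toList[6], ?_, ?_⟩
  · simp [List.getElem?_eq_getElem h6lt]
  · calc step.toList = step.toList.take 6 ++ step.toList.drop 6 :=
          (List.take_append_drop 6 step.toList).symm
      _ = "CLASS_".toList ++ (step.toList[6] :: step.toList.drop 7) := by rw [h6, hd]
      _ = "CLASS_".toList ++ step.toList[6] :: rest := by rw [h7]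

-- ===== VERDICT (by name: the statement is the Claim_ definition above) =====
theorem get_payment_priority_py_spec : Claim_equal_get_payment_priority_py := by
  intro step _
  unfold Spec_get_payment_priority_py
  by_cases e1 : step = "TRUSTEE_FEES";          · subst e1; decide
  by_cases e2 : step = "ADMIN_FEES";            · subst e2; decide
  by_cases e3 : step = "SENIOR_MGMT_FEES";      · subst e3; decide
  by_cases e4 : step = "CLASS_A_INTEREST";      · subst e4; decide
  by_cases e5 : step = "CLASS_B_INTEREST";      · subst e5; decide
  by_cases e6 : step = "CLASS_C_INTEREST";      · subst e6; decide
  by_cases e7 : step = "CLASS_D_INTEREST";      · subst e7; decide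
  by_cases e8 : step = "INTEREST_RESERVE";      · subst e8; decide
  by_cases e9 : step = "CLASS_A_PRINCIPAL";     · subst e9; decide
  by_cases e10 : step = "CLASS_B_PRINCIPAL";    · subst e10; decide
  by_cases e11 : step = "CLASS_C_PRINCIPAL";    · subst e11; decide
  by_cases e12 : step = "CLASS_D_PRINCIPAL";    · subst e12; decide
  by_cases e13 : step = "CLASS_E_INTEREST";     · subst e13; decide
  by_cases e14 : step = "CLASS_E_PRINCIPAL";    · subst e14; decide
  -- generic case: both sides return "RESIDUAL"
  have hA : get_payment_priority_py step = "RESIDUAL" := by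
    simp [get_payment_priority_py, e1, e2, e3, e4, e5, e6, e7, e8, e9, e10, e11, e12, e13, e14]
  rw [hA]
  -- B side
  unfold get_payment_priority_py_alt
  have hstr : ∀ t : String, step.toList = t.toList → step = t := fun t h => String.toList_inj.mp h
  by_cases hc : PySem.Str.slice step none (some 6) = "CLASS_" ∧
      (PySem.Str.slice step (some 7) none = "_INTEREST" ∨
       PySem.Str.slice step (some 7) none = "_PRINCIPAL")
  · -- CLASS-pattern branch: the tranche letter cannot be A..E
    rw [if_pos hc]
    obtain ⟨h6, h7⟩ := hc
    have key : ∀ (rest : List Char), 9 ≤ rest.length →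
        (PySem.Str.slice step (some 7) none).toList = rest →
        (∀ c, step.toList = "CLASS_".toList ++ c :: rest →
          ('A' ≤ c ∧ c ≤ 'D' → False) ∧ (c = 'E' → False)) →
        "RESIDUAL" =
          (match PySem.Str.pyGet? step 6 with
           | some tranche =>
               if 'A' ≤ tranche ∧ tranche ≤ 'D' then "SENIOR"
               else if tranche = 'E' then "SUBORDINATED"
               else "RESIDUAL"
           | none => "RESIDUAL") := by
      intro rest hr h7' hbad
      obtain ⟨c, hget, hlist⟩ := class_shape step rest hr (congrArg String.toList h6) h7'
      have hpg : PySem.Str.pyGet? step 6 = some c := by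
        rw [show ((6:Int) = ((6:Nat):Int)) from rfl, PySem.Str.pyGet?_natCast]; exact hget
      rw [hpg]
      show "RESIDUAL" =
        (if 'A' ≤ c ∧ c ≤ 'D' then "SENIOR" else if c = 'E' then "SUBORDINATED" else "RESIDUAL")
      rw [if_neg (fun h => (hbad c hlist).1 h), if_neg (fun h => (hbad c hlist).2 h)]
    rcases h7 with h7 | h7
    · refine key "_INTEREST".toList (by decide) (congrArg String.toList h7) ?_
      intro c hlist
      refine ⟨fun hAD => ?_, fun hE => ?_⟩
      · rcases (tranche_range_iff c).mp hAD with rfl|rfl|rfl|rfl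
        · exact e4 (hstr _ (by rw [hlist]; decide))
        · exact e5 (hstr _ (by rw [hlist]; decide))
        · exact e6 (hstr _ (by rw [hlist]; decide))
        · exact e7 (hstr _ (by rw [hlist]; decide))
      · subst hE; exact e13 (hstr _ (by rw [hlist]; decide))
    · refine key "_PRINCIPAL".toList (by decide) (congrArg String.toList h7) ?_
      intro c hlist
      refine ⟨fun hAD => ?_, fun hE => ?_⟩
      · rcases (tranche_range_iff c).mp hAD with rfl|rfl|rfl|rfl
        · exact e9 (hstr _ (by rw [hlist]; decide))
        · exact e10 (hstr _ (by rw [hlist]; decide))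
        · exact e11 (hstr _ (by rw [hlist]; decide))
        · exact e12 (hstr _ (by rw [hlist]; decide))
      · subst hE; exact e14 (hstr _ (by rw [hlist]; decide))
  rw [if_neg hc]
  by_cases hf : PySem.Str.endswith step "_FEES" = true
  swap
  · -- not a fee step either
    rw [if_neg (by simpa using hf), if_neg e8]
  rw [if_pos (by simpa using hf)]
  by_cases hm : PySem.Str.slice step none (some (-5)) ∈ (["TRUSTEE", "ADMIN", "SENIOR_MGMT"] : List String)
  swap
  · rw [if_neg hm]
  · -- "_FEES" branch with a senior prefix: step would be one of the three fee steps
    exfalso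
    rw [PySem.Str.endswith_eq] at hf
    have hsuf : "_FEES".toList <:+ step.toList := (PySem.Chars.endswith_iff _ _).mp hf
    obtain ⟨pre, hpre⟩ := hsuf
    have hsl : (PySem.Str.slice step none (some (-5))).toList = pre := by
      simp only [PySem.Str.toList_slice, PySem.Chars.slice_eq_listSlice]
      rw [show ((-5:Int) = -((5:Nat):Int)) from rfl,
        PySem.List.slice_to_neg_natCast _ 5 (by omega), ← hpre]
      simp
    simp only [List.mem_cons, List.not_mem_nil, or_false] at hm
    rcases hm with h | h | h
    · exact e1 (hstr _ (by rw [← hpre, ← hsl, congrArg String.toList h]; decide))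
    · exact e2 (hstr _ (by rw [← hpre, ← hsl, congrArg String.toList h]; decide))
    · exact e3 (hstr _ (by rw [← hpre, ← hsl, congrArg String.toList h]; decide))
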